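-- pv_equiv track=rewrite | github.com/High-Rise-Games/Rise-and-Shine | cugl/scripts/util.py | applyPrefix
-- ===== SOURCE A (Python) =====
-- def applyPrefix(prefix,uuid):
--     """
--     Returns a copy of UUID with the given prefix applied.
--
--     The prefix is not concatenated, but instead is substituted
--     for the beginning of the uuid. Any non-hexadecimal characters
--     (such as dashed) are ignored for purposes of substitution.
--     If prefix is longer than the UUID, it will be truncated to
--     fit.
--
--     Applying a prefix ruins all uniqueness guarantees for the UUID.
--     It is up to the application designer to check for uniqueness
--     after applying a prefix.
--
--     :param prefix: The prefix to apply
--     :type prefix:  ``str``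
--
--     :param uuid: The UUID (Apple or RFC 4122) to modify
--     :type uuid:  ``str``
--
--     :return: a copy of UUID with the given prefix applied.
--     :rtype:  ``str``
--     """
--     copy = ''
--     for ii in range(max(len(prefix),len(uuid))):
--         if ii < len(uuid) and uuid[ii] == '-':
--             copy += uuid[ii]
--         elif ii < len(prefix):
--             copy += prefix[ii]
--         else:
--             copy += uuid[ii]
--
--     return copy[:len(uuid)]
-- ===== SOURCE B (Python) =====
-- def applyPrefix(prefix, uuid):
--     """Copy-then-overwrite: take the uuid as the base and patch prefix
--     characters into non-dash positions up to min(len(prefix), len(uuid))."""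
--     result = list(uuid)
--     for ii in range(min(len(prefix), len(uuid))):
--         if uuid[ii] != '-':
--             result[ii] = prefix[ii]
--     return ''.join(result)
-- ===== Notes on version B (the rewrite author's own statement) =====
-- stated objective: simpler
-- what changed: B copies the uuid and overwrites its non-dash positions with the positional prefix characters in one loop to min(len(prefix), len(uuid)), instead of A's character-by-character string build over range(max(...)) with a three-way branch and a final truncating slice.
import Mathlib
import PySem

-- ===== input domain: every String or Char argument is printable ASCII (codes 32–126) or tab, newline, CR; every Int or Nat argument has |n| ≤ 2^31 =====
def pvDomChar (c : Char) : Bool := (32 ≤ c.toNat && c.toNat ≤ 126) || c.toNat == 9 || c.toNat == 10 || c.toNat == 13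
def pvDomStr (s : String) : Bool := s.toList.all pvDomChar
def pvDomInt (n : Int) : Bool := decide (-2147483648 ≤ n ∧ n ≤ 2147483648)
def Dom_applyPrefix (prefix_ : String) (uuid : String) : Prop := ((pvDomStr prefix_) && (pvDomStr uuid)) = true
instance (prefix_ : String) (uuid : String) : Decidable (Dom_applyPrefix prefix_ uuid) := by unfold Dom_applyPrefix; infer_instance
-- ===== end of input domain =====

-- B rebuilds the result by copying the uuid and overwriting its non-dash positions with the
-- positional prefix characters (one truncating loop to min length, no per-character 3-way
-- append nor final slice); objective: simpler.

-- ===== PORT A =====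
-- builds `copy` character by character over range(max(len(prefix),len(uuid))), then slices to len(uuid)
def applyPrefix (prefix_ : String) (uuid : String) : String :=
  let p := prefix_.toList
  let u := uuid.toList
  let copy : List Char :=
    (PySem.List.pyRange 0 (max (p.length : Int) (u.length : Int)) 1).foldl
      (fun copy ii =>
        if ii < (u.length : Int) ∧ PySem.List.pyGetD u ii ' ' = '-' then
          copy ++ [PySem.List.pyGetD u ii ' ']
        else if ii < (p.length : Int) then
          copy ++ [PySem.List.pyGetD p ii ' ']
        else
          copy ++ [PySem.List.pyGetD u ii ' '])
      []
  String.ofList (PySem.List.slice copy none (some (u.length : Int)))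

-- ===== PORT B =====
-- result = list(uuid); patch result[ii] = prefix[ii] at non-dash positions, ii < min of the lengths
def applyPrefix_alt (prefix_ : String) (uuid : String) : String :=
  let p := prefix_.toList
  let u := uuid.toList
  let result : List Char :=
    (PySem.List.pyRange 0 (min (p.length : Int) (u.length : Int)) 1).foldl
      (fun result ii =>
        if ¬ PySem.List.pyGetD u ii ' ' = '-' then
          PySem.List.pySetD result ii (PySem.List.pyGetD p ii ' ')
        else result)
      u
  String.ofList result

-- ===== PRECONDITION & SPEC =====
def Spec_applyPrefix (prefix_ : String) (uuid : String) (out : String) : Prop := out = applyPrefix_alt prefix_ uuid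
instance (prefix_ : String) (uuid : String) (out : String) : Decidable (Spec_applyPrefix prefix_ uuid out) := by unfold Spec_applyPrefix; infer_instance

-- ===== CLAIM (what is proved, stated in full; the proofs are below) =====
def Claim_equal_applyPrefix : Prop := ∀ (prefix_ : String) (uuid : String), Dom_applyPrefix prefix_ uuid → Spec_applyPrefix prefix_ uuid (applyPrefix prefix_ uuid)

-- ===== LEMMAS AND PROOFS =====

-- the character A's loop emits at position i
def pvG (p u : List Char) (i : Nat) : Char :=
  if i < u.length ∧ u.getD i ' ' = '-' then u.getD i ' '
  else if i < p.length then p.getD i ' ' else u.getD i ' '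

-- B's loop state after processing indices < n
def pvH (p u : List Char) (n i : Nat) : Char :=
  if i < n ∧ ¬ u.getD i ' ' = '-' then p.getD i ' ' else u.getD i ' '

theorem pv_map_getD_range (l : List Char) :
    (List.range l.length).map (fun j => l.getD j ' ') = l := by
  apply List.ext_getElem
  · simp
  · intro i h1 h2
    simp [List.getD, List.getElem?_eq_getElem h2]

-- A's copy list is a map over List.range
theorem pvA_copy (p u : List Char) :
    (PySem.List.pyRange 0 (max (p.length : Int) (u.length : Int)) 1).foldl
      (fun copy ii =>
        if ii < (u.length : Int) ∧ PySem.List.pyGetD u ii ' ' = '-' then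
          copy ++ [PySem.List.pyGetD u ii ' ']
        else if ii < (p.length : Int) then
          copy ++ [PySem.List.pyGetD p ii ' ']
        else
          copy ++ [PySem.List.pyGetD u ii ' '])
      []
    = (List.range (max p.length u.length)).map (pvG p u) := by
  have hmax : max (p.length : Int) (u.length : Int) = ((max p.length u.length : Nat) : Int) := by
    push_cast; rfl
  rw [hmax, PySem.List.pyRange_one, List.foldl_map]
  simp only [Int.sub_zero, Int.toNat_natCast, zero_add]
  generalize max p.length u.length = m
  induction m with
  | zero => simp
  | succ n ih =>
      rw [List.range_succ, List.foldl_append, List.map_append, ih]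
      simp only [List.foldl_cons, List.foldl_nil, List.map_cons, List.map_nil]
      unfold pvG
      by_cases hu : n < u.length <;> by_cases hp : n < p.length <;>
        simp [hu, hp, PySem.List.pyGetD_natCast, List.getD] <;> split_ifs <;> rfl

-- B's loop invariant
theorem pvB_loop (p u : List Char) (n : Nat) (hn : n ≤ min p.length u.length) :
    (PySem.List.pyRange 0 (n : Int) 1).foldl
      (fun result ii =>
        if ¬ PySem.List.pyGetD u ii ' ' = '-' then
          PySem.List.pySetD result ii (PySem.List.pyGetD p ii ' ')
        else result)
      u
    = (List.range u.length).map (pvH p u n) := by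
  induction n with
  | zero =>
      simp only [Nat.cast_zero, PySem.List.pyRange_zero]
      rw [show (pvH p u 0) = (fun j => u.getD j ' ') from funext fun j => by simp [pvH]]
      exact (pv_map_getD_range u).symm
  | succ n ih =>
      have hn' : n ≤ min p.length u.length := Nat.le_of_succ_le hn
      have hnp : n < p.length := by omega
      have hnu : n < u.length := by omega
      have hsplit : PySem.List.pyRange 0 ((n + 1 : Nat) : Int) 1
          = PySem.List.pyRange 0 (n : Nat) 1 ++ [(n : Int)] := by
        have := PySem.List.pyRange_one_succ_right (a := 0) (b := (n : Nat)) (by positivity)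
        push_cast
        push_cast at this
        exact this
      rw [hsplit, List.foldl_append, ih hn']
      simp only [List.foldl_cons, List.foldl_nil]
      by_cases hd : u[n]?.getD ' ' = '-'
      · rw [if_neg (by simp [PySem.List.pyGetD_natCast, List.getD, hd])]
        apply List.map_congr_left
        intro i _
        unfold pvH
        simp only [List.getD]
        by_cases hin : i < n
        · simp [hin, show i < n + 1 by omega]
        · by_cases hieq : i = n
          · subst hieq; simp [hd]
          · simp [hin, show ¬ i < n + 1 by omega]
      · rw [if_pos (by simp [PySem.List.pyGetD_natCast, List.getD, hd])]
        simp only [PySem.List.pyGetD_natCast, PySem.List.pySetD_natCast]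
        apply List.ext_getElem
        · simp
        · intro i h1 h2
          rw [List.getElem_set]
          simp only [List.getElem_map, List.getElem_range]
          unfold pvH
          simp only [List.getD]
          by_cases hin : n = i
          · subst hin
            rw [List.getElem?_eq_getElem hnu] at hd
            simp only [Option.getD_some] at hd
            simp [hd, hnu, List.getElem?_eq_getElem hnp]
          · by_cases hi1 : i < n + 1
            · have h3 : i < n := by omega
              simp [hin, h3, hi1]
            · have h3 : ¬ i < n := by omega
              simp [hin, h3, hi1]

theorem pv_pointwise (p u : List Char) (i : Nat) (hi : i < u.length) :
    pvG p u i = pvH p u (min p.length u.length) i := by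
  unfold pvG pvH
  by_cases hd : u.getD i ' ' = '-' <;> by_cases hp : i < p.length <;>
    simp [hi, hp]

-- ===== VERDICT (by name: the statement is the Claim_ definition above) =====
theorem applyPrefix_spec : Claim_equal_applyPrefix := by
  intro prefix_ uuid _
  simp only [Spec_applyPrefix, applyPrefix, applyPrefix_alt]
  rw [pvA_copy]
  rw [show min (prefix_.toList.length : Int) (uuid.toList.length : Int)
      = ((min prefix_.toList.length uuid.toList.length : Nat) : Int) from by push_cast; rfl]
  rw [pvB_loop _ _ _ (le_refl _)]
  rw [PySem.List.slice_to_natCast]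
  congr 1
  rw [← List.map_take, List.take_range]
  have h1 : min uuid.toList.length (max prefix_.toList.length uuid.toList.length) = uuid.toList.length := by omega
  rw [h1]
  exact List.map_congr_left (fun i hi => pv_pointwise _ _ _ (List.mem_range.mp hi))
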